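-- pv_equiv track=rewrite | github.com/jordenrsantos-sys/MTG-Deck | api/engine/layers/redundancy_index_v1.py | _sort_notes
-- ===== SOURCE A (Python) =====
-- from typing import Any, Dict, List
--
-- def _sort_notes(notes: List[Dict[str, str]]) -> List[Dict[str, str]]:
--     unique_pairs = {
--         (str(entry.get("code") or ""), str(entry.get("message") or ""))
--         for entry in notes
--         if isinstance(entry, dict)
--     }
--     return [
--         {
--             "code": code,
--             "message": message,
--         }
--         for code, message in sorted(unique_pairs, key=lambda item: (item[0], item[1]))
--         if code != "" and message != ""
--     ]
-- ===== SOURCE B (Python) =====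
-- from typing import Any, Dict, List
--
-- def _insert_unique(pair, sorted_pairs):
--     """Insert pair into an ascending duplicate-free list, keeping it so."""
--     if not sorted_pairs:
--         return [pair]
--     head = sorted_pairs[0]
--     if pair < head:
--         return [pair] + sorted_pairs
--     if pair == head:
--         return sorted_pairs
--     return [head] + _insert_unique(pair, sorted_pairs[1:])
--
-- def _sort_notes(notes: List[Dict[str, str]]) -> List[Dict[str, str]]:
--     ordered = []
--     for entry in notes:
--         if not isinstance(entry, dict):
--             continue
--         pair = (str(entry.get("code") or ""), str(entry.get("message") or ""))
--         if pair[0] == "" or pair[1] == "":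
--             continue
--         ordered = _insert_unique(pair, ordered)
--     return [{"code": code, "message": message} for code, message in ordered]
-- ===== Notes on version B (the rewrite author's own statement) =====
-- stated objective: alternative
-- what changed: Replaces set-dedup followed by a library sort with a single left-to-right pass that maintains an ascending duplicate-free list via recursive ordered insertion (no set, no sort call), filtering empty codes/messages before insertion instead of after sorting.
import Mathlib
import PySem

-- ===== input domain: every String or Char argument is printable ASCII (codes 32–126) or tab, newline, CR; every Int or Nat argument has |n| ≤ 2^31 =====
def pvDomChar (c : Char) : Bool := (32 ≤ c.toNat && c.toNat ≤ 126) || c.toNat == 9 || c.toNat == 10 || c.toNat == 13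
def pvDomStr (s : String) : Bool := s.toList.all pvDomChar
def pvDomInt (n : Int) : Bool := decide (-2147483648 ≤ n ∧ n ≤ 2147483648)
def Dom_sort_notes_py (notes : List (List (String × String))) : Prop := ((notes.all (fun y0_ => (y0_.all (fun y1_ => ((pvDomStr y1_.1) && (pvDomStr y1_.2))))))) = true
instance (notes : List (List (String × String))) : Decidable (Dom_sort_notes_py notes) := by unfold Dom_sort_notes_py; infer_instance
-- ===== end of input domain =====

-- B drops the set and the library sort: one pass that keeps an ascending duplicate-free
-- list by recursive ordered insertion, filtering empty fields before insertion (alternative, same result).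

-- ===== PORT A =====
def sort_notes_py (notes : List (List (String × String))) : List (List (String × String)) :=
  let unique_pairs : PySem.Set (String × String) :=
    PySem.Set.ofList (notes.map (fun entry =>
      (PySem.Dict.getD (PySem.Dict.mk entry) "code" "", PySem.Dict.getD (PySem.Dict.mk entry) "message" "")))
  (PySem.List.sorted2 unique_pairs Prod.fst Prod.snd).filterMap
    (fun p => if p.1 ≠ "" ∧ p.2 ≠ "" then some [("code", p.1), ("message", p.2)] else none)

-- ===== PORT B =====
-- _insert_unique of Source B: keep an ascending duplicate-free list (tuple comparison = lex order)
def pvInsertUnique (pair : String × String) : List (String × String) → List (String × String)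
  | [] => [pair]
  | head :: t =>
    if toLex pair < toLex head then pair :: head :: t
    else if pair = head then head :: t
    else head :: pvInsertUnique pair t

def sort_notes_py_alt (notes : List (List (String × String))) : List (List (String × String)) :=
  (notes.foldl (fun ordered entry =>
      let pair : String × String :=
        (PySem.Dict.getD (PySem.Dict.mk entry) "code" "", PySem.Dict.getD (PySem.Dict.mk entry) "message" "")
      if pair.1 = "" ∨ pair.2 = "" then ordered else pvInsertUnique pair ordered) []).map
    (fun p => [("code", p.1), ("message", p.2)])

-- ===== PRECONDITION & SPEC =====
def Spec_sort_notes_py (notes : List (List (String × String))) (out : List (List (String × String))) : Prop := out = sort_notes_py_alt notes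
instance (notes : List (List (String × String))) (out : List (List (String × String))) : Decidable (Spec_sort_notes_py notes out) := by unfold Spec_sort_notes_py; infer_instance

-- ===== CLAIM (what is proved, stated in full; the proofs are below) =====
def Claim_equal_sort_notes_py : Prop := ∀ (notes : List (List (String × String))), Dom_sort_notes_py notes → Spec_sort_notes_py notes (sort_notes_py notes)

-- ===== LEMMAS AND PROOFS =====

-- proof-side names
def pvPair (entry : List (String × String)) : String × String :=
  (PySem.Dict.getD (PySem.Dict.mk entry) "code" "", PySem.Dict.getD (PySem.Dict.mk entry) "message" "")

def pvEmit (p : String × String) : Option (List (String × String)) :=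
  if p.1 ≠ "" ∧ p.2 ≠ "" then some [("code", p.1), ("message", p.2)] else none

def pvToDict (p : String × String) : List (String × String) := [("code", p.1), ("message", p.2)]

def pvR (a b : String × String) : Prop := toLex a < toLex b

theorem pv_lex_before (a b : String × String) :
    (decide (a.1 < b.1) || (!decide (b.1 < a.1) && decide (a.2 < b.2))) = decide (toLex a < toLex b) := by
  rw [Bool.eq_iff_iff]
  simp only [Bool.or_eq_true, Bool.and_eq_true, Bool.not_eq_true', decide_eq_true_eq,
    decide_eq_false_iff_not, Prod.Lex.lt_iff, ofLex_toLex]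
  by_cases hf : a.1 < b.1
  · simp [hf]
  · simp only [hf, false_or]
    constructor
    · rintro ⟨h1, h2⟩
      exact ⟨le_antisymm (not_lt.mp h1) (not_lt.mp hf), h2⟩
    · rintro ⟨h1, h2⟩
      exact ⟨fun hlt => absurd (h1 ▸ hlt) (lt_irrefl _), h2⟩

theorem pv_sorted2_eq (xs : List (String × String)) :
    PySem.List.sorted2 xs Prod.fst Prod.snd = PySem.List.sorted xs (fun p => toLex p) := by
  unfold PySem.List.sorted2 PySem.List.sorted
  simp only [Bool.false_eq_true, if_false]
  congr 1
  funext acc x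
  congr 1
  funext a b
  exact pv_lex_before a b

theorem pv_mem_insertUnique (p x : String × String) (l : List (String × String)) :
    x ∈ pvInsertUnique p l ↔ x = p ∨ x ∈ l := by
  induction l with
  | nil => simp [pvInsertUnique]
  | cons h t ih =>
    by_cases h1 : toLex p < toLex h
    · simp [pvInsertUnique, h1]
    · by_cases h2 : p = h
      · subst h2
        simp only [pvInsertUnique, if_neg h1]
        simp only [if_true, List.mem_cons]
        tauto
      · simp only [pvInsertUnique, if_neg h1, if_neg h2, List.mem_cons, ih]
        tauto

theorem pv_pairwise_insertUnique (p : String × String) (l : List (String × String))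
    (h : l.Pairwise pvR) : (pvInsertUnique p l).Pairwise pvR := by
  induction l with
  | nil => simpa [pvInsertUnique, pvR] using h
  | cons q t ih =>
    rw [List.pairwise_cons] at h
    by_cases h1 : toLex p < toLex q
    · rw [pvInsertUnique, if_pos h1, List.pairwise_cons]
      refine ⟨?_, List.pairwise_cons.mpr h⟩
      intro x hx
      rcases List.mem_cons.mp hx with rfl | hx
      · exact h1
      · exact lt_trans h1 (h.1 x hx)
    · by_cases h2 : p = q
      · rw [pvInsertUnique, if_neg h1, if_pos h2, List.pairwise_cons]
        exact h
      · have hqp : toLex q < toLex p := by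
          rcases lt_trichotomy (toLex p) (toLex q) with hlt | heq | hgt
          · exact absurd hlt h1
          · exact absurd (toLex.injective heq) h2
          · exact hgt
        rw [pvInsertUnique, if_neg h1, if_neg h2, List.pairwise_cons]
        refine ⟨?_, ih h.2⟩
        intro x hx
        rcases (pv_mem_insertUnique p x t).mp hx with rfl | hx
        · exact hqp
        · exact h.1 x hx

-- B's fold, over the normalized pair list
def pvFold (ps : List (String × String)) (acc : List (String × String)) : List (String × String) :=
  ps.foldl (fun ordered pair => if pair.1 = "" ∨ pair.2 = "" then ordered else pvInsertUnique pair ordered) acc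

theorem pv_fold_invariant (ps : List (String × String)) :
    ∀ acc, acc.Pairwise pvR →
      (pvFold ps acc).Pairwise pvR ∧
      (∀ x, x ∈ pvFold ps acc ↔ x ∈ acc ∨ (x ∈ ps ∧ x.1 ≠ "" ∧ x.2 ≠ "")) := by
  induction ps with
  | nil => intro acc h; exact ⟨h, by simp [pvFold]⟩
  | cons p t ih =>
    intro acc h
    by_cases hc : p.1 = "" ∨ p.2 = ""
    · have he : pvFold (p :: t) acc = pvFold t acc := by simp [pvFold, hc]
      have ht := ih acc h
      refine ⟨he ▸ ht.1, ?_⟩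
      intro x
      rw [he, ht.2 x]
      constructor
      · rintro (hx | ⟨hx, hne⟩)
        · exact Or.inl hx
        · exact Or.inr ⟨List.mem_cons_of_mem _ hx, hne⟩
      · rintro (hx | ⟨hx, hne⟩)
        · exact Or.inl hx
        · rcases List.mem_cons.mp hx with rfl | hx
          · exact absurd hc (by tauto)
          · exact Or.inr ⟨hx, hne⟩
    · have he : pvFold (p :: t) acc = pvFold t (pvInsertUnique p acc) := by
        simp [pvFold, hc]
      have ht := ih (pvInsertUnique p acc) (pv_pairwise_insertUnique p acc h)
      push_neg at hc
      refine ⟨he ▸ ht.1, ?_⟩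
      intro x
      rw [he, ht.2 x, pv_mem_insertUnique]
      constructor
      · rintro ((rfl | hx) | ⟨hx, hne⟩)
        · exact Or.inr ⟨List.mem_cons_self, hc⟩
        · exact Or.inl hx
        · exact Or.inr ⟨List.mem_cons_of_mem _ hx, hne⟩
      · rintro (hx | ⟨hx, hne⟩)
        · exact Or.inl (Or.inr hx)
        · rcases List.mem_cons.mp hx with rfl | hx
          · exact Or.inl (Or.inl rfl)
          · exact Or.inr ⟨hx, hne⟩

-- two strictly ascending lists with the same members are equal
theorem pv_eq_of_pairwise_lt_mem :
    ∀ (l1 l2 : List (String × String)), l1.Pairwise pvR → l2.Pairwise pvR →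
      (∀ x, x ∈ l1 ↔ x ∈ l2) → l1 = l2 := by
  intro l1
  induction l1 with
  | nil =>
    intro l2 _ _ hm
    cases l2 with
    | nil => rfl
    | cons b t2 => exact absurd ((hm b).mpr List.mem_cons_self) (List.not_mem_nil)
  | cons a t1 ih =>
    intro l2 h1 h2 hm
    cases l2 with
    | nil => exact absurd ((hm a).mp List.mem_cons_self) (List.not_mem_nil)
    | cons b t2 =>
      rw [List.pairwise_cons] at h1 h2
      have hab : a = b := by
        rcases List.mem_cons.mp ((hm a).mp List.mem_cons_self) with h | ha2
        · exact h
        · rcases List.mem_cons.mp ((hm b).mpr List.mem_cons_self) with h | hb1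
          · exact h.symm
          · exact absurd (h1.1 b hb1) (lt_asymm (h2.1 a ha2))
      subst hab
      have htm : ∀ x, x ∈ t1 ↔ x ∈ t2 := by
        intro x
        constructor
        · intro hx
          rcases List.mem_cons.mp ((hm x).mp (List.mem_cons_of_mem _ hx)) with rfl | h
          · exact absurd (h1.1 x hx) (lt_irrefl _)
          · exact h
        · intro hx
          rcases List.mem_cons.mp ((hm x).mpr (List.mem_cons_of_mem _ hx)) with rfl | h
          · exact absurd (h2.1 x hx) (lt_irrefl _)
          · exact h
      rw [ih t2 h1.2 h2.2 htm]

theorem pv_filterMap_emit (l : List (String × String)) :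
    l.filterMap pvEmit = (l.filter (fun p => decide (p.1 ≠ "" ∧ p.2 ≠ ""))).map pvToDict := by
  induction l with
  | nil => rfl
  | cons p t ih =>
    by_cases hc : p.1 ≠ "" ∧ p.2 ≠ ""
    · have h1 : pvEmit p = some (pvToDict p) := by simp [pvEmit, pvToDict, hc]
      rw [List.filterMap_cons, h1, List.filter_cons, if_pos (by simpa using hc), List.map_cons, ih]
    · have h1 : pvEmit p = none := by simp [pvEmit, hc]
      rw [List.filterMap_cons, h1, List.filter_cons, if_neg (by simp [hc]), ih]

-- ===== VERDICT (by name: the statement is the Claim_ definition above) =====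
theorem sort_notes_py_spec : Claim_equal_sort_notes_py := by
  intro notes _
  show sort_notes_py notes = sort_notes_py_alt notes
  have hb : sort_notes_py_alt notes = (pvFold (notes.map pvPair) []).map pvToDict := by
    unfold sort_notes_py_alt pvFold
    rw [List.foldl_map]
    rfl
  have ha : sort_notes_py notes
      = (PySem.List.sorted2 (PySem.Set.ofList (notes.map pvPair)) Prod.fst Prod.snd).filterMap pvEmit := rfl
  rw [pv_sorted2_eq] at ha
  set L := PySem.List.sorted (PySem.Set.ofList (notes.map pvPair)) (fun p => toLex p) with hL
  have hLle : L.Pairwise (fun a b => toLex a ≤ toLex b) :=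
    PySem.List.sorted_pairwise _ _
  have hLnd : L.Nodup :=
    ((PySem.List.sorted_perm _ _ _).nodup_iff).mpr (PySem.Set.nodup_ofList _)
  have hLlt : L.Pairwise pvR := by
    have := hLle.and hLnd
    exact this.imp (fun {a b} h => lt_of_le_of_ne h.1 (fun he => h.2 (toLex.injective he)))
  have hLmem : ∀ x, x ∈ L ↔ x ∈ notes.map pvPair := by
    intro x
    rw [hL, PySem.List.mem_sorted, PySem.Set.mem_ofList]
  have hfold := pv_fold_invariant (notes.map pvPair) [] List.Pairwise.nil
  have heq : L.filter (fun p => decide (p.1 ≠ "" ∧ p.2 ≠ "")) = pvFold (notes.map pvPair) [] := by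
    apply pv_eq_of_pairwise_lt_mem
    · exact hLlt.filter _
    · exact hfold.1
    · intro x
      rw [List.mem_filter, hfold.2 x, hLmem x]
      simp
  rw [ha, hb, pv_filterMap_emit, heq]
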